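-- pv_equiv track=rewrite | github.com/tudelft/indiflightSupport | LogAnalysis/indiflightLogTools/indiflight_log_importer.py | _getModeChanges
-- ===== SOURCE A (Python) =====
-- def _getModeChanges(new, old=0):
--     # find if bits have been turned on (enabled) or turned off (enabled)
--     # between two int32
--     enabled = []
--     disabled = []
--     for i in range(32):
--         bitSel = (1 << i)
--         if (new & bitSel) and not (old & bitSel):
--             enabled.append(i)
--         elif not (new & bitSel) and (old & bitSel):
--             disabled.append(i)
--
--     return enabled, disabled
-- ===== SOURCE B (Python) =====
-- def _getModeChanges(new, old=0):
--     # reduce to two 32-bit difference masks, then collect set-bit indices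
--     M = 0xFFFFFFFF
--     n = new & M
--     o = old & M
--
--     def _bitIndices(mask):
--         out = []
--         i = 0
--         while mask:
--             if mask & 1:
--                 out.append(i)
--             mask >>= 1
--             i += 1
--         return out
--
--     return _bitIndices(n & (o ^ M)), _bitIndices(o & (n ^ M))
-- ===== Notes on version B (the rewrite author's own statement) =====
-- stated objective: alternative
-- what changed: Instead of scanning all 32 bit positions of both ints with per-index selectors and an if/elif chain, B reduces the inputs to two 32-bit difference masks (enabled = n & ~o, disabled = o & ~n, both taken mod 2^32) and then collects the set-bit indices of each mask by consuming it with shift-and-test, stopping as soon as the mask is exhausted.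
import Mathlib
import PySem

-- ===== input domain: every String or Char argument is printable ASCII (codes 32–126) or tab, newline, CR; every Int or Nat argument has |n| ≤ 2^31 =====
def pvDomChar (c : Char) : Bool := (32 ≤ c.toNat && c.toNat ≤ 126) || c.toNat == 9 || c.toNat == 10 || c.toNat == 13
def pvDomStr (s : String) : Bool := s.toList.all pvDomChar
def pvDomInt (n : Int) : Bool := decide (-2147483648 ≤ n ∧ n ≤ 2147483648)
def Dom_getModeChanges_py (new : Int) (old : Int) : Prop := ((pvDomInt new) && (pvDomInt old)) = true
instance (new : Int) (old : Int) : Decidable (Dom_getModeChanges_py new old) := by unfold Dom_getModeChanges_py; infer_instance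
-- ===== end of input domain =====

-- B replaces A's fixed if/elif scan over all 32 bit positions of both ints by two 32-bit
-- difference masks whose set-bit indices are collected with shift-and-test until each mask
-- is exhausted (objective: alternative; same return value, no side effects).

-- ===== PORT A =====
-- literal port of A: for i in range(32), bitSel = 1 << i, if/elif appending to the two lists
def getModeChanges_py (new : Int) (old : Int) : List Int × List Int :=
  (PySem.List.pyRange 0 32 1).foldl
    (fun (st : List Int × List Int) i =>
      let bitSel : Int := (1 : Int) <<< i.toNat   -- i ≥ 0 on range(32), so .toNat is exact
      if PySem.Int.band new bitSel ≠ 0 ∧ PySem.Int.band old bitSel = 0 then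
        (st.1 ++ [i], st.2)
      else if PySem.Int.band new bitSel = 0 ∧ PySem.Int.band old bitSel ≠ 0 then
        (st.1, st.2 ++ [i])
      else st)
    ([], [])

-- ===== PORT B =====
-- the inner while loop of Source B's _bitIndices; its mask argument is provably nonnegative
-- (it comes from an & with 0xFFFFFFFF), so it is carried as a Nat; mask >>= 1 is >>> 1
def pvBitIndices (mask : Nat) (i : Int) : List Int :=
  if _h : mask = 0 then []
  else (if mask &&& 1 = 1 then [i] else []) ++ pvBitIndices (mask >>> 1) (i + 1)
  decreasing_by simp [Nat.shiftRight_one]; omega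

def getModeChanges_py_alt (new : Int) (old : Int) : List Int × List Int :=
  let M : Nat := 4294967295
  let n : Nat := (PySem.Int.band new ((M : Nat) : Int)).toNat   -- new & M ≥ 0: toNat is exact
  let o : Nat := (PySem.Int.band old ((M : Nat) : Int)).toNat
  (pvBitIndices (n &&& (o ^^^ M)) 0, pvBitIndices (o &&& (n ^^^ M)) 0)

-- ===== PRECONDITION & SPEC =====
def Spec_getModeChanges_py (new : Int) (old : Int) (out : List Int × List Int) : Prop := out = getModeChanges_py_alt new old
instance (new : Int) (old : Int) (out : List Int × List Int) : Decidable (Spec_getModeChanges_py new old out) := by unfold Spec_getModeChanges_py; infer_instance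

-- ===== CLAIM (what is proved, stated in full; the proofs are below) =====
def Claim_equal_getModeChanges_py : Prop := ∀ (new : Int) (old : Int), Dom_getModeChanges_py new old → Spec_getModeChanges_py new old (getModeChanges_py new old)

-- ===== LEMMAS AND PROOFS =====

-- (2^k - 1 - X) is the bitwise complement of X below bit k
theorem pv_compl_testBit (j : Nat) : ∀ (k X : Nat), X < 2 ^ k → j < k →
    (2 ^ k - 1 - X).testBit j = !(X.testBit j) := by
  induction j with
  | zero =>
    intro k X hX hj
    obtain ⟨k', rfl⟩ : ∃ k', k = k' + 1 := ⟨k - 1, by omega⟩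
    have h2 : 2 ^ (k' + 1) = 2 * 2 ^ k' := by ring
    simp only [Nat.testBit_zero]
    have hmod : (2 ^ (k' + 1) - 1 - X) % 2 = 1 - X % 2 := by omega
    rw [hmod]
    rcases Nat.mod_two_eq_zero_or_one X with h | h <;> simp [h]
  | succ j ih =>
    intro k X hX hj
    obtain ⟨k', rfl⟩ : ∃ k', k = k' + 1 := ⟨k - 1, by omega⟩
    have h2 : 2 ^ (k' + 1) = 2 * 2 ^ k' := by ring
    simp only [Nat.testBit_succ]
    have hdiv : (2 ^ (k' + 1) - 1 - X) / 2 = 2 ^ k' - 1 - X / 2 := by omega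
    rw [hdiv]
    exact ih k' (X / 2) (by omega) (by omega)

-- a & 0xFFFFFFFF (Python &) lands below 2^32
theorem pv_band_mask_lt (a : Int) : (PySem.Int.band a ((4294967295 : Nat) : Int)).toNat < 2 ^ 32 := by
  unfold PySem.Int.band
  have hM : ((4294967295 : Nat) : Int).toNat = 4294967295 := rfl
  split_ifs with h1 h2 h3
  · simp only [Int.toNat_natCast, hM]
    have := @Nat.and_le_right a.toNat 4294967295
    omega
  · omega
  · simp only [Int.toNat_natCast, hM]
    omega
  · omega

-- the bit test A performs, expressed on the masked Nat that B computes
theorem pv_band_mask_testBit (a : Int) (j : Nat) (hj : j < 32) :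
    (PySem.Int.band a ((4294967295 : Nat) : Int)).toNat.testBit j =
      decide (PySem.Int.band a (((2 ^ j : Nat) : Int)) ≠ 0) := by
  have hMpos : (0 : Int) ≤ ((4294967295 : Nat) : Int) := by positivity
  have hppos : (0 : Int) ≤ (((2 ^ j : Nat) : Int)) := by positivity
  have hMeq : (4294967295 : Nat) = 2 ^ 32 - 1 := rfl
  by_cases ha : 0 ≤ a
  · unfold PySem.Int.band
    rw [if_pos ha, if_pos ha, if_pos hMpos, if_pos hppos]
    simp only [Int.toNat_natCast]
    rw [Nat.testBit_land, hMeq, Nat.testBit_two_pow_sub_one]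
    rcases h : a.toNat.testBit j with _ | _ <;>
      simp [h, hj, Nat.and_two_pow]
  · unfold PySem.Int.band
    rw [if_neg ha, if_neg ha, if_pos hMpos, if_pos hppos]
    simp only [Int.toNat_natCast]
    set c := (-a - 1).toNat with hc
    have hland : (4294967295 : Nat) &&& c = c % 2 ^ 32 := by
      apply Nat.eq_of_testBit_eq
      intro i
      rw [Nat.testBit_land, hMeq, Nat.testBit_two_pow_sub_one, Nat.testBit_mod_two_pow,
        Bool.and_comm]
    rw [hland]
    have h1 : (4294967295 - c % 2 ^ 32 : Nat) = 2 ^ 32 - 1 - c % 2 ^ 32 := by omega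
    rw [h1, pv_compl_testBit j 32 (c % 2 ^ 32) (Nat.mod_lt _ (by norm_num)) hj,
      Nat.testBit_mod_two_pow]
    rcases h : c.testBit j with _ | _ <;>
      simp [h, hj, Nat.two_pow_and]

-- B's bit collector is the ascending list of set-bit indices
theorem pv_bitIndices_eq (k : Nat) : ∀ (mask : Nat) (i : Int), mask < 2 ^ k →
    pvBitIndices mask i = ((List.range k).filter (fun j => mask.testBit j)).map (fun (j : Nat) => i + (j : Int)) := by
  induction k with
  | zero => intro mask i h; interval_cases mask; simp [pvBitIndices]
  | succ k ih =>
    intro mask i h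
    by_cases h0 : mask = 0
    · simp [pvBitIndices, h0, Nat.zero_testBit]
    · rw [pvBitIndices, dif_neg h0]
      rw [ih (mask >>> 1) (i + 1) (by simp [Nat.shiftRight_one]; omega)]
      rw [List.range_succ_eq_map, List.filter_cons, List.filter_map]
      have hbit0 : (mask &&& 1 = 1) ↔ mask.testBit 0 = true := by
        simp [Nat.and_one_is_mod, Nat.testBit_zero]
      have hfil : List.filter ((fun j => mask.testBit j) ∘ Nat.succ) (List.range k)
          = List.filter (fun j => (mask >>> 1).testBit j) (List.range k) := by
        apply List.filter_congr; intro x _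
        simp [Function.comp, Nat.testBit_succ, Nat.shiftRight_one]
      have hmap : ∀ L : List Nat, List.map (fun (j : Nat) => i + (j : Int)) (List.map Nat.succ L)
          = List.map (fun (j : Nat) => (i + 1) + (j : Int)) L := by
        intro L; rw [List.map_map]; apply List.map_congr_left; intro x _
        simp [Function.comp]; ring
      by_cases hb : mask.testBit 0
      · rw [if_pos (hbit0.mpr hb), if_pos (by simpa using hb)]
        simp only [hfil, hmap]
        simp
        all_goals intros; ring
      · rw [if_neg (fun hc => hb (hbit0.mp hc)), if_neg (by simpa using hb)]
        simp only [hfil, hmap]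
        simp
        all_goals intros; ring

-- A's loop is a pair of filters
theorem pv_foldl_filter (p q : Int → Prop) [DecidablePred p] [DecidablePred q]
    (l : List Int) : ∀ (acc1 acc2 : List Int),
    l.foldl (fun (st : List Int × List Int) i =>
        if p i then (st.1 ++ [i], st.2)
        else if q i then (st.1, st.2 ++ [i])
        else st) (acc1, acc2)
      = (acc1 ++ l.filter (fun i => decide (p i)),
         acc2 ++ l.filter (fun i => decide (¬ p i ∧ q i))) := by
  induction l with
  | nil => simp
  | cons x xs ih =>
    intro acc1 acc2
    by_cases hp : p x
    · simp [List.foldl_cons, hp, ih]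
    · by_cases hq : q x
      · simp [List.foldl_cons, hp, hq, ih]
      · simp [List.foldl_cons, hp, hq, ih]

-- one side of the result: A's filtered index list is B's bit collection
theorem pv_side (x y : Int) :
    ((PySem.List.pyRange 0 32 1).filter
        (fun i => decide (PySem.Int.band x ((1 : Int) <<< ((i.toNat : Nat) : Int)) ≠ 0 ∧
                          PySem.Int.band y ((1 : Int) <<< ((i.toNat : Nat) : Int)) = 0)))
      = pvBitIndices ((PySem.Int.band x ((4294967295 : Nat) : Int)).toNat &&&
          ((PySem.Int.band y ((4294967295 : Nat) : Int)).toNat ^^^ 4294967295)) 0 := by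
  have hrange : PySem.List.pyRange 0 32 1 = (List.range 32).map (fun (j : Nat) => (j : Int)) := by
    decide
  set xN := (PySem.Int.band x ((4294967295 : Nat) : Int)).toNat with hxN
  set yN := (PySem.Int.band y ((4294967295 : Nat) : Int)).toNat with hyN
  have hlt : xN &&& (yN ^^^ 4294967295) < 2 ^ 32 :=
    Nat.lt_of_le_of_lt Nat.and_le_left (pv_band_mask_lt x)
  rw [pv_bitIndices_eq 32 _ 0 hlt, hrange, List.filter_map]
  have hfil : ∀ j ∈ List.range 32,
      ((fun i => decide (PySem.Int.band x ((1 : Int) <<< ((i.toNat : Nat) : Int)) ≠ 0 ∧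
                          PySem.Int.band y ((1 : Int) <<< ((i.toNat : Nat) : Int)) = 0)) ∘ (fun (j : Nat) => (j : Int))) j
        = (xN &&& (yN ^^^ 4294967295)).testBit j := by
    intro j hj
    have hj32 : j < 32 := List.mem_range.mp hj
    have hshift : (1 : Int) <<< ((((j : Int)).toNat : Nat) : Int) = (((2 ^ j : Nat) : Int)) := by
      rw [Int.toNat_natCast, show ((1 : Int)) = ((1 : Nat) : Int) from rfl, Int.shiftLeft_natCast]
      simp [Nat.one_shiftLeft]
    have hM : (4294967295 : Nat) = 2 ^ 32 - 1 := rfl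
    simp only [Function.comp]
    simp only [hshift]
    rw [Nat.testBit_land, Nat.testBit_xor, hM, Nat.testBit_two_pow_sub_one,
      pv_band_mask_testBit x j hj32, pv_band_mask_testBit y j hj32]
    by_cases hx : PySem.Int.band x (((2 ^ j : Nat) : Int)) = 0 <;>
      by_cases hy : PySem.Int.band y (((2 ^ j : Nat) : Int)) = 0 <;>
        simp [hx, hy, hj32]
  rw [List.filter_congr hfil]
  apply List.map_congr_left
  intro j _
  simp

-- ===== VERDICT (by name: the statement is the Claim_ definition above) =====
theorem getModeChanges_py_spec : Claim_equal_getModeChanges_py := by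
  intro new old _
  unfold Spec_getModeChanges_py
  have hA : getModeChanges_py new old =
      ([] ++ (PySem.List.pyRange 0 32 1).filter
          (fun i => decide (PySem.Int.band new ((1 : Int) <<< ((i.toNat : Nat) : Int)) ≠ 0 ∧
                            PySem.Int.band old ((1 : Int) <<< ((i.toNat : Nat) : Int)) = 0)),
       [] ++ (PySem.List.pyRange 0 32 1).filter
          (fun i => decide (¬ (PySem.Int.band new ((1 : Int) <<< ((i.toNat : Nat) : Int)) ≠ 0 ∧
                              PySem.Int.band old ((1 : Int) <<< ((i.toNat : Nat) : Int)) = 0) ∧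
                            (PySem.Int.band new ((1 : Int) <<< ((i.toNat : Nat) : Int)) = 0 ∧
                             PySem.Int.band old ((1 : Int) <<< ((i.toNat : Nat) : Int)) ≠ 0)))) := by
    unfold getModeChanges_py
    exact pv_foldl_filter _ _ _ [] []
  have hq : (PySem.List.pyRange 0 32 1).filter
          (fun i => decide (¬ (PySem.Int.band new ((1 : Int) <<< ((i.toNat : Nat) : Int)) ≠ 0 ∧
                              PySem.Int.band old ((1 : Int) <<< ((i.toNat : Nat) : Int)) = 0) ∧
                            (PySem.Int.band new ((1 : Int) <<< ((i.toNat : Nat) : Int)) = 0 ∧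
                             PySem.Int.band old ((1 : Int) <<< ((i.toNat : Nat) : Int)) ≠ 0)))
      = (PySem.List.pyRange 0 32 1).filter
          (fun i => decide (PySem.Int.band old ((1 : Int) <<< ((i.toNat : Nat) : Int)) ≠ 0 ∧
                            PySem.Int.band new ((1 : Int) <<< ((i.toNat : Nat) : Int)) = 0)) := by
    apply List.filter_congr
    intro x _
    rw [decide_eq_decide]
    tauto
  rw [hA, hq, List.nil_append, List.nil_append, pv_side new old, pv_side old new]
  rfl
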